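/- GENERATED by farm/mkstatement.py from design/units.tsv (unit `gif_decode.COMPOSITION`) and the Specs of Gif/Spec/*.lean — do not edit.
   THE STATEMENT of the proof unit `gif_decode.COMPOSITION`: the function `gif_decode` (149 instructions) satisfies its contract,
   GIVEN THE STATEMENTS OF ITS 7 SEGMENTS (`Gif.Spec.gif_decode.Seg<k> Lay μ u₀`: what the unit `gif_decode.<k>` proves).
   No machine code is walked: `ReachVia.trans` along the segments (the exit assertion of a segment is the entry assertion of
   its successor), an induction on the loop measures. What the names mean: ProgX/Base/Spec/Basic.lean. The theorem to prove:
   `theorem gif_decode_COMPOSITION_ok : Gif.Spec.gif_decode_COMPOSITION.Statement`. -/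
import Gif.Code
import Gif.Dec.All
import Gif.Labels
import Gif.Spec.Driver
import Gif.Spec.Seg_gif_decode
namespace Gif.Spec.gif_decode_COMPOSITION
open X86 X86.User Asan

/-- The statement of unit `gif_decode.COMPOSITION`. -/
def Statement : Prop :=
  ∀ (Lay : Layout) (_hLay : Lay.hi = 0x1000000) (μ : Microarch) (_hμ : UserX.MicroOK μ) (u₀ : State)
    (_h_gif_decode_P : Gif.Spec.gif_decode.SegP Lay μ u₀)
    (_h_gif_decode_1 : Gif.Spec.gif_decode.Seg1 Lay μ u₀)
    (_h_gif_decode_2 : Gif.Spec.gif_decode.Seg2 Lay μ u₀)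
    (_h_gif_decode_3 : Gif.Spec.gif_decode.Seg3 Lay μ u₀)
    (_h_gif_decode_4 : Gif.Spec.gif_decode.Seg4 Lay μ u₀)
    (_h_gif_decode_5 : Gif.Spec.gif_decode.Seg5 Lay μ u₀)
    (_h_gif_decode_E : Gif.Spec.gif_decode.SegE Lay μ u₀),
    ∀ (H : Heap) (rest : List Obj) (frames : List (Nat × FrameLayout)), Calls Lay μ ProgX.Base.WayInv (ProgX.Base.conv u₀) Gif.L.gif_decode.entry (Gif.Spec.gif_decode.spec H rest frames)

end Gif.Spec.gif_decode_COMPOSITION
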